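-- pv_equiv track=rewrite | github.com/as950118/Algorithm | wooah/7.py | solution
-- ===== SOURCE A (Python) =====
-- def solution(cryptogram):
--     answer = ''
--     n = len(cryptogram)
--     state = 0
--     for i in range(n):
--         #같은 문자 발견
--         if (i!=n-1 and cryptogram[i] == cryptogram[i+1]) or (i!=0 and cryptogram[i] == cryptogram[i-1]):
--             state = 1
--             continue
--         else:
--             answer += cryptogram[i]
--     #만약 같은문자가 있었다면 다시 반복해줌
--     if state == 1:
--         return solution(answer)
--     #없다면 반환하고 종료
--     return answer
-- ===== SOURCE B (Python) =====
-- def solution(cryptogram):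
--     # run-length encode once, then wave-remove on the run list until stable
--     runs = []
--     for ch in cryptogram:
--         if runs and runs[-1][0] == ch:
--             runs[-1][1] += 1
--         else:
--             runs.append([ch, 1])
--     while any(cnt > 1 for _, cnt in runs):
--         new = []
--         for ch, cnt in runs:
--             if cnt == 1:
--                 if new and new[-1][0] == ch:
--                     new[-1][1] += 1
--                 else:
--                     new.append([ch, 1])
--         runs = new
--     return ''.join(ch for ch, _ in runs)
-- ===== Notes on version B (the rewrite author's own statement) =====
-- stated objective: alternative
-- what changed: B run-length-encodes the string once and then repeats the removal wave on the run list (dropping runs of count>1 and re-merging the surviving singletons by count arithmetic) instead of A's per-character neighbour comparisons with string concatenation and recursion.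
import Mathlib
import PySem

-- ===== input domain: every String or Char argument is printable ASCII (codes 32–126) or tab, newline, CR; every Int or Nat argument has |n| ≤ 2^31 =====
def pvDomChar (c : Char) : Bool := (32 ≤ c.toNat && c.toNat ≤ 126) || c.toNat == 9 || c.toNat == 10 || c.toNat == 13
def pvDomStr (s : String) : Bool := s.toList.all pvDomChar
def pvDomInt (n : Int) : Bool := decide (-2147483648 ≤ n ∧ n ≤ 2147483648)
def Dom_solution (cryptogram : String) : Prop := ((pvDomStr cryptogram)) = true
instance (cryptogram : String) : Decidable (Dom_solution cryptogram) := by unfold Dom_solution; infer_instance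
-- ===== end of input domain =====

-- B replaces A's per-character neighbour scan + recursion by repeated removal waves on a
-- run-length encoding of the string (objective: alternative; no measured speed claim).

-- ===== PORT A =====
-- one pass of A's for-loop: (answer, state) after 'for i in range(n): ...'
def passA (cs : List Char) : List Char × Bool :=
  let n : Int := PySem.List.len cs
  (PySem.List.pyRange 0 n 1).foldl
    (fun acc i =>
      if (i ≠ n - 1 ∧ PySem.List.pyGet? cs i = PySem.List.pyGet? cs (i + 1)) ∨
         (i ≠ 0 ∧ PySem.List.pyGet? cs i = PySem.List.pyGet? cs (i - 1))
      then (acc.1, true)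
      else (acc.1 ++ (PySem.List.pyGet? cs i).toList, acc.2))
    ([], false)

-- termination of A's recursion: when state is set, at least one character was dropped
lemma passA_len_lt (cs : List Char) (h : (passA cs).2 = true) :
    (passA cs).1.length < cs.length := by
  have key : ∀ (l : List Int) (acc : List Char × Bool),
      ((l.foldl
        (fun acc i =>
          if (i ≠ (PySem.List.len cs) - 1 ∧ PySem.List.pyGet? cs i = PySem.List.pyGet? cs (i + 1)) ∨
             (i ≠ 0 ∧ PySem.List.pyGet? cs i = PySem.List.pyGet? cs (i - 1))
          then (acc.1, true)
          else (acc.1 ++ (PySem.List.pyGet? cs i).toList, acc.2)) acc).1.length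
        + (if (l.foldl
            (fun acc i =>
              if (i ≠ (PySem.List.len cs) - 1 ∧ PySem.List.pyGet? cs i = PySem.List.pyGet? cs (i + 1)) ∨
                 (i ≠ 0 ∧ PySem.List.pyGet? cs i = PySem.List.pyGet? cs (i - 1))
              then (acc.1, true)
              else (acc.1 ++ (PySem.List.pyGet? cs i).toList, acc.2)) acc).2 then 1 else 0))
      ≤ acc.1.length + (if acc.2 then 1 else 0) + l.length := by
    intro l
    induction l with
    | nil => intro acc; cases h : acc.2 <;> simp [h]
    | cons i t ih =>
      intro acc
      simp only [List.foldl_cons, List.length_cons]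
      refine le_trans (ih _) ?_
      split
      · simp; omega
      · have : ((PySem.List.pyGet? cs i).toList).length ≤ 1 := by
          cases PySem.List.pyGet? cs i <;> simp
        simp only [List.length_append]
        omega
  have h2 := key (PySem.List.pyRange 0 (PySem.List.len cs) 1) ([], false)
  have hlen : (PySem.List.pyRange 0 (PySem.List.len cs) 1).length = cs.length := by
    rw [PySem.List.length_pyRange_one]
    simp [PySem.List.len_eq]
  rw [hlen] at h2
  unfold passA at h ⊢
  simp only [h, if_pos] at h2 ⊢
  simp only [List.length_nil, if_neg Bool.false_ne_true] at h2
  omega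

def solList (cs : List Char) : List Char :=
  if (passA cs).2 then solList (passA cs).1 else (passA cs).1
termination_by cs.length
decreasing_by exact passA_len_lt cs (by assumption)

def solution (cryptogram : String) : String := String.ofList (solList cryptogram.toList)

-- ===== PORT B =====
-- 'if runs and runs[-1][0] == ch: runs[-1][1] += 1 else: runs.append([ch, 1])'
def addRun (runs : List (Char × Int)) (ch : Char) : List (Char × Int) :=
  match runs.getLast? with
  | some (c, k) => if c = ch then runs.dropLast ++ [(c, k + 1)] else runs ++ [(ch, 1)]
  | none => [(ch, 1)]

def rleOf (cs : List Char) : List (Char × Int) := cs.foldl addRun []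

-- one iteration of B's while-loop body: keep the count-1 runs, re-merging as we go
def passB (runs : List (Char × Int)) : List (Char × Int) :=
  runs.foldl (fun acc p => if p.2 = 1 then addRun acc p.1 else acc) []

-- total character count held by a run list (loop measure)
def muB (runs : List (Char × Int)) : Nat := (runs.map (fun p => p.2.toNat)).sum

lemma addRun_muB (acc : List (Char × Int)) (c : Char)
    (hpos : ∀ p ∈ acc, 1 ≤ p.2) : muB (addRun acc c) = muB acc + 1 := by
  rcases List.eq_nil_or_concat acc with rfl | ⟨as, ⟨d, k⟩, rfl⟩
  · simp [addRun, muB]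
  · simp only [List.concat_eq_append] at hpos ⊢
    have hk : 1 ≤ k := hpos (d, k) (by simp)
    simp only [addRun, List.getLast?_concat, List.dropLast_concat]
    split
    · simp [muB]; omega
    · simp [muB]; omega

lemma addRun_pos (acc : List (Char × Int)) (c : Char)
    (hpos : ∀ p ∈ acc, 1 ≤ p.2) : ∀ p ∈ addRun acc c, 1 ≤ p.2 := by
  rcases List.eq_nil_or_concat acc with rfl | ⟨as, ⟨d, k⟩, rfl⟩
  · simp [addRun]
  · simp only [List.concat_eq_append] at hpos ⊢
    have hk : 1 ≤ k := hpos (d, k) (by simp)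
    simp only [addRun, List.getLast?_concat, List.dropLast_concat]
    split
    · intro p hp
      simp only [List.mem_append, List.mem_singleton] at hp
      rcases hp with h | h
      · exact hpos p (List.mem_append_left _ h)
      · subst h; simp; omega
    · intro p hp
      simp only [List.mem_append, List.mem_singleton] at hp
      rcases hp with h | h
      · rcases h with h | h
        · exact hpos p (List.mem_append_left _ h)
        · subst h; exact hpos (d, k) (by simp)
      · subst h; simp

lemma passB_muB (r : List (Char × Int)) :
    muB (passB r) = (r.countP (fun p => p.2 = 1)) := by
  have key : ∀ (l : List (Char × Int)) (acc : List (Char × Int)),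
      (∀ p ∈ acc, 1 ≤ p.2) →
      muB (l.foldl (fun acc p => if p.2 = 1 then addRun acc p.1 else acc) acc)
        = muB acc + l.countP (fun p => p.2 = 1) := by
    intro l
    induction l with
    | nil => intro acc _; simp
    | cons p t ih =>
      intro acc hacc
      simp only [List.foldl_cons, List.countP_cons]
      by_cases hp : p.2 = 1
      · rw [if_pos hp, ih _ (addRun_pos acc p.1 hacc), addRun_muB acc p.1 hacc]
        simp [hp]; omega
      · rw [if_neg hp, ih _ hacc]
        simp [hp]
  have := key r [] (by simp)
  simpa [passB, muB] using this

lemma countP_lt_muB (r : List (Char × Int)) (h : r.any (fun p => 1 < p.2) = true) :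
    r.countP (fun p => p.2 = 1) < muB r := by
  induction r with
  | nil => simp at h
  | cons p t ih =>
    have hle : ∀ (s : List (Char × Int)), s.countP (fun p => p.2 = 1) ≤ muB s := by
      intro s
      induction s with
      | nil => simp [muB]
      | cons q u ihq =>
        simp only [List.countP_cons, muB, List.map_cons, List.sum_cons]
        by_cases hq : q.2 = 1
        · simp only [hq]; simp [muB] at ihq ⊢; omega
        · simp only [hq]; simp [muB] at ihq ⊢; omega
    simp only [List.any_cons, Bool.or_eq_true] at h
    simp only [List.countP_cons, muB, List.map_cons, List.sum_cons]
    rcases h with h | h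
    · have h1 : 1 < p.2 := by simpa using h
      have := hle t
      have hne : ¬ (p.2 = 1) := by omega
      simp only [hne, decide_false]
      simp [muB] at this ⊢; omega
    · have := ih h
      simp [muB] at this ⊢
      by_cases hp : p.2 = 1 <;> simp [hp] <;> omega

lemma passB_lt (r : List (Char × Int)) (h : r.any (fun p => 1 < p.2) = true) :
    muB (passB r) < muB r := by
  rw [passB_muB]; exact countP_lt_muB r h

def loopB (runs : List (Char × Int)) : List (Char × Int) :=
  if runs.any (fun p => 1 < p.2) then loopB (passB runs) else runs
termination_by muB runs
decreasing_by exact passB_lt runs (by assumption)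

def solution_alt (cryptogram : String) : String :=
  String.ofList ((loopB (rleOf cryptogram.toList)).map Prod.fst)

-- ===== PRECONDITION & SPEC =====
def Spec_solution (cryptogram : String) (out : String) : Prop := out = solution_alt cryptogram
instance (cryptogram : String) (out : String) : Decidable (Spec_solution cryptogram out) := by unfold Spec_solution; infer_instance

-- ===== CLAIM (what is proved, stated in full; the proofs are below) =====
def Claim_equal_solution : Prop := ∀ (cryptogram : String), Dom_solution cryptogram → Spec_solution cryptogram (solution cryptogram)

-- ===== LEMMAS AND PROOFS =====

-- structural reformulation of A's pass: keep a char iff it differs from both neighbours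
def passP (prev : Option Char) : List Char → List Char × Bool
  | [] => ([], false)
  | c :: rest =>
    let r := passP (some c) rest
    if rest.head? = some c ∨ prev = some c then (r.1, true) else (c :: r.1, r.2)

lemma passA_bridge (cs : List Char) :
    ∀ (suf pre : List Char) (acc : List Char) (st : Bool), cs = pre ++ suf →
    ((PySem.List.pyRange pre.length (PySem.List.len cs) 1).foldl
      (fun acc i =>
        if (i ≠ (PySem.List.len cs) - 1 ∧ PySem.List.pyGet? cs i = PySem.List.pyGet? cs (i + 1)) ∨
           (i ≠ 0 ∧ PySem.List.pyGet? cs i = PySem.List.pyGet? cs (i - 1))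
        then (acc.1, true)
        else (acc.1 ++ (PySem.List.pyGet? cs i).toList, acc.2)) (acc, st))
      = (acc ++ (passP pre.getLast? suf).1, st || (passP pre.getLast? suf).2) := by
  intro suf
  induction suf with
  | nil =>
    intro pre acc st hcs
    rw [PySem.List.pyRange_one_eq_nil (by simp [PySem.List.len_eq, hcs])]
    simp [passP]
  | cons c rest ih =>
    intro pre acc st hcs
    have hlen : cs.length = pre.length + rest.length + 1 := by simp [hcs]; omega
    have hlt : (pre.length : Int) < PySem.List.len cs := by
      rw [PySem.List.len_eq]; omega
    rw [PySem.List.pyRange_one_cons hlt, List.foldl_cons]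
    have hget : PySem.List.pyGet? cs (pre.length : Int) = some c := by
      rw [hcs]; exact PySem.List.pyGet?_append_length pre rest c
    have hget1 : PySem.List.pyGet? cs ((pre.length : Int) + 1) = rest.head? := by
      rw [hcs]
      have h := PySem.List.pyGet?_append_right pre (c :: rest) 1
      rw [List.head?_eq_getElem?]
      simpa using h
    have hC : (((pre.length : Int) ≠ (PySem.List.len cs) - 1 ∧
          PySem.List.pyGet? cs (pre.length : Int) = PySem.List.pyGet? cs ((pre.length : Int) + 1)) ∨
        ((pre.length : Int) ≠ 0 ∧
          PySem.List.pyGet? cs (pre.length : Int) = PySem.List.pyGet? cs ((pre.length : Int) - 1)))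
        ↔ (rest.head? = some c ∨ pre.getLast? = some c) := by
      constructor
      · rintro (⟨h1, h2⟩ | ⟨h1, h2⟩)
        · left; rw [hget, hget1] at h2; exact h2.symm
        · right
          rw [hget] at h2
          rcases List.eq_nil_or_concat pre with rfl | ⟨ps, d, rfl⟩
          · simp at h1
          · simp only [List.concat_eq_append] at hcs h2 ⊢
            have hpl : (((ps ++ [d]).length : Int)) - 1 = (ps.length : Int) := by simp
            rw [hpl] at h2
            have hd : PySem.List.pyGet? cs (ps.length : Int) = some d := by
              rw [hcs, List.append_assoc, List.singleton_append]
              exact PySem.List.pyGet?_append_length ps (c :: rest) d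
            rw [hd] at h2
            rw [List.getLast?_concat]
            exact congrArg some (Option.some.inj h2).symm
      · rintro (h | h)
        · left
          cases rest with
          | nil => simp at h
          | cons r0 rs =>
            refine ⟨?_, ?_⟩
            · rw [PySem.List.len_eq]
              simp only [List.length_cons] at hlen
              intro he
              rw [hlen] at he
              push_cast at he
              omega
            · rw [hget, hget1]; exact h.symm
        · right
          rcases List.eq_nil_or_concat pre with rfl | ⟨ps, d, rfl⟩
          · simp at h
          · simp only [List.concat_eq_append] at hcs hget h ⊢
            rw [List.getLast?_concat] at h
            have hd : d = c := Option.some.inj h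
            refine ⟨?_, ?_⟩
            · simp only [List.length_append, List.length_cons, List.length_nil,
                Nat.cast_add, Nat.cast_one]
              omega
            · have hpl : (((ps ++ [d]).length : Int)) - 1 = (ps.length : Int) := by simp
              rw [hget, hpl, hcs, List.append_assoc, List.singleton_append,
                PySem.List.pyGet?_append_length ps (c :: rest) d, hd]
    by_cases hcd : rest.head? = some c ∨ pre.getLast? = some c
    · rw [if_pos (hC.mpr hcd)]
      have hcs' : cs = (pre ++ [c]) ++ rest := by rw [hcs]; simp
      have ih' := ih (pre ++ [c]) acc true hcs'
      have hl : ((pre ++ [c]).length : Int) = (pre.length : Int) + 1 := by simp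
      rw [hl, List.getLast?_concat] at ih'
      rw [ih']
      have : passP pre.getLast? (c :: rest)
          = ((passP (some c) rest).1, true) := by
        simp only [passP]
        rw [if_pos hcd]
      rw [this]
      simp
    · rw [if_neg (fun h => hcd (hC.mp h))]
      have hcs' : cs = (pre ++ [c]) ++ rest := by rw [hcs]; simp
      have ih' := ih (pre ++ [c]) (acc ++ [c]) st hcs'
      have hl : ((pre ++ [c]).length : Int) = (pre.length : Int) + 1 := by simp
      rw [hl, List.getLast?_concat] at ih'
      rw [hget]
      simp only [Option.toList_some]
      rw [ih']
      have : passP pre.getLast? (c :: rest)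
          = (c :: (passP (some c) rest).1, (passP (some c) rest).2) := by
        simp only [passP]
        rw [if_neg hcd]
      rw [this]
      simp

lemma passA_eq_passP (cs : List Char) : passA cs = passP none cs := by
  have h := passA_bridge cs cs [] [] false rfl
  simp only [List.length_nil, Nat.cast_zero, List.getLast?_nil, List.nil_append,
    Bool.false_or] at h
  unfold passA
  exact h

def decodeR (r : List (Char × Int)) : List Char :=
  r.flatMap (fun p => List.replicate p.2.toNat p.1)

def validR (r : List (Char × Int)) : Prop :=
  (∀ p ∈ r, 1 ≤ p.2) ∧ (r.map Prod.fst).IsChain (· ≠ ·)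

lemma addRun_chain (acc : List (Char × Int)) (c : Char) (h : validR acc) :
    ((addRun acc c).map Prod.fst).IsChain (· ≠ ·) := by
  obtain ⟨hpos, hch⟩ := h
  rcases List.eq_nil_or_concat acc with rfl | ⟨as, ⟨d, k⟩, rfl⟩
  · simp [addRun]
  · simp only [List.concat_eq_append] at hpos hch ⊢
    simp only [addRun, List.getLast?_concat, List.dropLast_concat]
    split
    · simpa using hch
    · next hne =>
      rw [List.map_append, List.isChain_append]
      refine ⟨hch, by simp, ?_⟩
      intro x hx y hy
      simp at hx hy
      subst hx; subst hy; exact hne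

lemma addRun_decode (acc : List (Char × Int)) (c : Char) (hpos : ∀ p ∈ acc, 1 ≤ p.2) :
    decodeR (addRun acc c) = decodeR acc ++ [c] := by
  rcases List.eq_nil_or_concat acc with rfl | ⟨as, ⟨d, k⟩, rfl⟩
  · simp [addRun, decodeR]
  · simp only [List.concat_eq_append] at hpos ⊢
    have hk : 1 ≤ k := hpos (d, k) (by simp)
    simp only [addRun, List.getLast?_concat, List.dropLast_concat]
    split
    · next heq =>
      subst heq
      have hkn : (k + 1).toNat = k.toNat + 1 := by omega
      simp [decodeR, hkn, List.replicate_succ']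
    · simp [decodeR]

lemma addRun_spec (acc : List (Char × Int)) (c : Char) (h : validR acc) :
    validR (addRun acc c) ∧ decodeR (addRun acc c) = decodeR acc ++ [c] :=
  ⟨⟨addRun_pos acc c h.1, addRun_chain acc c h⟩, addRun_decode acc c h.1⟩

lemma rle_aux : ∀ (cs : List Char) (acc : List (Char × Int)), validR acc →
    validR (cs.foldl addRun acc) ∧ decodeR (cs.foldl addRun acc) = decodeR acc ++ cs := by
  intro cs
  induction cs with
  | nil => intro acc h; simpa using h
  | cons c t ih =>
    intro acc h
    obtain ⟨h1, h2⟩ := addRun_spec acc c h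
    obtain ⟨g1, g2⟩ := ih (addRun acc c) h1
    exact ⟨g1, by simp [g2, h2]⟩

lemma rleOf_spec (cs : List Char) : validR (rleOf cs) ∧ decodeR (rleOf cs) = cs := by
  have := rle_aux cs [] ⟨by simp, by simp⟩
  simpa [rleOf, decodeR] using this

lemma decode_head (r : List (Char × Int)) (hv : ∀ p ∈ r, 1 ≤ p.2) :
    (decodeR r).head? = r.head?.map Prod.fst := by
  cases r with
  | nil => simp [decodeR]
  | cons p t =>
    have h1 : 1 ≤ p.2 := hv p (by simp)
    obtain ⟨m, hm⟩ : ∃ m, p.2.toNat = m + 1 := ⟨p.2.toNat - 1, by omega⟩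
    simp [decodeR, hm, List.replicate_succ]

lemma passP_replicate (c : Char) (s : List Char) (hs : s.head? ≠ some c) :
    ∀ (m : Nat), 2 ≤ m → ∀ prev, passP prev (List.replicate m c ++ s) = ((passP (some c) s).1, true) := by
  intro m hm
  induction m, hm using Nat.le_induction with
  | base =>
    intro prev
    have h2 : List.replicate 2 c ++ s = c :: c :: s := by
      simp [List.replicate_succ]
    rw [h2]
    simp only [passP]
    simp [hs]
  | succ m hm ih =>
    intro prev
    have hhead : (List.replicate m c ++ s).head? = some c := by
      have hm' : m = (m - 1) + 1 := by omega
      rw [hm', List.replicate_succ]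
      simp
    rw [List.replicate_succ, List.cons_append]
    simp only [passP]
    rw [ih (some c)]
    simp [hhead]

lemma passP_decode (r : List (Char × Int)) (prev : Option Char) (hv : validR r)
    (hprev : ∀ p, r.head? = some p → prev ≠ some p.1) :
    passP prev (decodeR r)
      = (((r.filter (fun p => p.2 = 1)).map Prod.fst), r.any (fun p => 1 < p.2)) := by
  induction r generalizing prev with
  | nil => simp [decodeR, passP]
  | cons p t ih =>
    obtain ⟨c, k⟩ := p
    obtain ⟨hpos, hch⟩ := hv
    have hk : 1 ≤ k := hpos (c, k) (by simp)
    have hpost : ∀ q ∈ t, 1 ≤ q.2 := fun q hq => hpos q (by simp [hq])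
    rw [List.map_cons, List.isChain_cons] at hch
    have htc : ∀ q, t.head? = some q → q.1 ≠ c := by
      intro q hq
      have := hch.1 q.1 (by simp [List.head?_map, hq])
      exact fun h => this h.symm
    have hvt : validR t := ⟨hpost, hch.2⟩
    have hdh : (decodeR t).head? ≠ some c := by
      rw [decode_head t hpost]
      cases ht : t.head? with
      | none => simp
      | some q => simpa using (htc q ht)
    have hdec : decodeR ((c, k) :: t) = List.replicate k.toNat c ++ decodeR t := by
      simp [decodeR]
    have hpr : ∀ q, t.head? = some q → (some c : Option Char) ≠ some q.1 := by
      intro q hq h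
      exact htc q hq (Option.some.inj h).symm
    by_cases hk1 : k = 1
    · subst hk1
      rw [hdec]
      have hrep : List.replicate ((1 : Int)).toNat c = [c] := rfl
      rw [hrep, List.singleton_append]
      simp only [passP]
      have hprev1 : prev ≠ some c := hprev (c, 1) rfl
      rw [if_neg (not_or.2 ⟨hdh, hprev1⟩)]
      rw [ih (some c) hvt hpr]
      simp [List.any_cons]
    · have hk2 : 2 ≤ k.toNat := by omega
      rw [hdec, passP_replicate c (decodeR t) hdh k.toNat hk2 prev]
      rw [ih (some c) hvt hpr]
      have hlt : (1 : Int) < k := by omega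
      simp [List.any_cons, hk1, hlt]

lemma passB_eq_rleOf (r : List (Char × Int)) :
    passB r = rleOf ((r.filter (fun p => p.2 = 1)).map Prod.fst) := by
  have key : ∀ (l : List (Char × Int)) (acc : List (Char × Int)),
      l.foldl (fun acc p => if p.2 = 1 then addRun acc p.1 else acc) acc
        = ((l.filter (fun p => p.2 = 1)).map Prod.fst).foldl addRun acc := by
    intro l
    induction l with
    | nil => intro acc; simp
    | cons p t ih =>
      intro acc
      by_cases hp : p.2 = 1 <;> simp [hp, ih]
  exact key r []

lemma solList_eq (cs : List Char) :
    solList cs = (loopB (rleOf cs)).map Prod.fst := by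
  induction hn : cs.length using Nat.strong_induction_on generalizing cs with
  | _ n ih =>
  subst hn
  obtain ⟨⟨hpos, hch⟩, hdec⟩ := rleOf_spec cs
  have hpass : passA cs
      = (((rleOf cs).filter (fun p => p.2 = 1)).map Prod.fst,
         (rleOf cs).any (fun p => 1 < p.2)) := by
    have h0 := passP_decode (rleOf cs) none ⟨hpos, hch⟩ (by intro p _; simp)
    rw [hdec] at h0
    rw [passA_eq_passP]
    exact h0
  by_cases hany : (rleOf cs).any (fun p => 1 < p.2) = true
  · have hst : (passA cs).2 = true := by rw [hpass]; exact hany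
    have hlt : (passA cs).1.length < cs.length := passA_len_lt cs hst
    have hB : loopB (rleOf cs) = loopB (passB (rleOf cs)) := by
      rw [loopB, if_pos hany]
    rw [solList, if_pos hst, hB, passB_eq_rleOf]
    have h1 : (passA cs).1 = ((rleOf cs).filter (fun p => p.2 = 1)).map Prod.fst :=
      congrArg Prod.fst hpass
    rw [← h1]
    exact ih _ hlt (passA cs).1 rfl
  · have hst : (passA cs).2 = false := by rw [hpass]; exact Bool.not_eq_true _ ▸ (by simpa using hany)
    have hall : ∀ p ∈ rleOf cs, p.2 = 1 := by
      intro p hp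
      have h1 : 1 ≤ p.2 := hpos p hp
      have h2 : ¬ (1 < p.2) := by
        intro hgt
        exact hany (List.any_eq_true.2 ⟨p, hp, by simpa using hgt⟩)
      omega
    have hfil : (rleOf cs).filter (fun p => p.2 = 1) = rleOf cs :=
      List.filter_eq_self.2 (fun p hp => by simpa using hall p hp)
    rw [solList, if_neg (by simp [hst]), hpass, loopB, if_neg (by simp [hany]), hfil]

-- ===== VERDICT (by name: the statement is the Claim_ definition above) =====
theorem solution_spec : Claim_equal_solution := by
  intro cryptogram _
  unfold Spec_solution solution solution_alt
  rw [solList_eq]
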